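-- pv_equiv track=rewrite | github.com/DooDuZ/sparta_python | daily/boj1105.py | solution
-- ===== SOURCE A (Python) =====
-- def solution(params):
--     n, m = params
--
--     digit_n, digit_m = list(map(int, str(n))), list(map(int, str(m)))
--
--     if len(digit_n) != len(digit_m):
--         return 0
--
--     if digit_n.count(8) == 0 or digit_m.count(8) == 0:
--         return 0
--
--     lng = len(digit_n)
--
--     cnt = 0
--
--     for i in range(lng):
--         if digit_n[i] == digit_m[i] == 8:
--             cnt += 1
--         elif digit_n[i] == digit_m[i]:
--             continue
--         else:
--             break
--
--     return cnt
-- ===== SOURCE B (Python) =====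
-- def solution(params):
--     n, m = params
--     if len(str(n)) != len(str(m)):
--         return 0
--     # strip trailing digits until the numbers agree; what is left is the common prefix as a number
--     while n != m:
--         n //= 10
--         m //= 10
--     # count the digit 8 in that prefix number
--     cnt = 0
--     while n > 0:
--         if n % 10 == 8:
--             cnt += 1
--         n //= 10
--     return cnt
-- ===== Notes on version B (the rewrite author's own statement) =====
-- stated objective: alternative
-- what changed: B works arithmetically on the numbers instead of on digit lists: it strips trailing digits (integer division by 10) from both numbers until they are equal, which leaves the common prefix as a number, then counts its digits equal to 8 with a mod/div loop; A builds int-digit lists, checks two count(8) guards and scans positions left-to-right with a break.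
import Mathlib
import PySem

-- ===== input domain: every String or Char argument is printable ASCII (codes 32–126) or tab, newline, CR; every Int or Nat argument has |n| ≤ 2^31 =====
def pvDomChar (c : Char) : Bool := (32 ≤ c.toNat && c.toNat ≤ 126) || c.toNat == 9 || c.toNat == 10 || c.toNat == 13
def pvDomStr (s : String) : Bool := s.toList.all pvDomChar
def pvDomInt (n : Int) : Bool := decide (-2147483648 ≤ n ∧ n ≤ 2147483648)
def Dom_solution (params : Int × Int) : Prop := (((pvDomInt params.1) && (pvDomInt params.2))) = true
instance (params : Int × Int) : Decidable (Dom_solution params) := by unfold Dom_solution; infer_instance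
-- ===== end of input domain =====

-- B replaces A's digit lists, count(8) guards and fused break-loop by integer arithmetic:
-- strip trailing digits (//10) from both numbers until they agree, then count digits 8 by mod/div.


-- ===== PORT A =====
-- list(map(int, str(n))): int(c) = code(c) - 48, exact for digit characters; on a non-digit
-- character ('-' of a negative number) Python raises ValueError — those inputs are outside Pre_.
def pvMapdA (s : List Char) : List Int := s.map (fun c => (c.toNat : Int) - 48)

-- the for-loop with break over the two digit lists, accumulator cnt
def pvLoopA : List Int → List Int → Int → Int
  | a :: as, b :: bs, cnt =>
    if a = b ∧ a = 8 then pvLoopA as bs (cnt + 1)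
    else if a = b then pvLoopA as bs cnt
    else cnt
  | _, _, cnt => cnt

def solution (params : Int × Int) : Int :=
  let digit_n := pvMapdA ((PySem.Int.toStr params.1).toList)
  let digit_m := pvMapdA ((PySem.Int.toStr params.2).toList)
  if digit_n.length ≠ digit_m.length then 0
  else if digit_n.count 8 = 0 ∨ digit_m.count 8 = 0 then 0
  else pvLoopA digit_n digit_m 0

-- ===== PORT B =====
-- 'while n != m: n //= 10; m //= 10' — the fuel argument is only a totality guard
-- (|n|+|m|+1 iterations always suffice on the admitted inputs; Python's loop has no bound)
def pvStripB : Nat → Int → Int → Int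
  | 0, n, _ => n
  | f + 1, n, m =>
    if n = m then n
    else pvStripB f (PySem.Int.floordiv n 10) (PySem.Int.floordiv m 10)

-- 'cnt = 0; while n > 0: if n % 10 == 8: cnt += 1; n //= 10' — fuel again only a totality guard
def pvCount8B : Nat → Int → Int → Int
  | 0, _, cnt => cnt
  | f + 1, n, cnt =>
    if 0 < n then
      pvCount8B f (PySem.Int.floordiv n 10) (cnt + (if PySem.Int.mod n 10 = 8 then 1 else 0))
    else cnt

def solution_alt (params : Int × Int) : Int :=
  let n := params.1
  let m := params.2
  if (PySem.Int.toStr n).toList.length ≠ (PySem.Int.toStr m).toList.length then 0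
  else
    let p := pvStripB (n.natAbs + m.natAbs + 1) n m
    pvCount8B (p.natAbs + 1) p 0

-- ===== PRECONDITION & SPEC =====
-- A raises ValueError on any negative argument (int('-')); exactly those inputs are excluded.
def Pre_solution (params : Int × Int) : Prop := 0 ≤ params.1 ∧ 0 ≤ params.2
instance (params : Int × Int) : Decidable (Pre_solution params) := by unfold Pre_solution; infer_instance
def pvWitness_solution : (Int × Int) := (808, 818)

def Spec_solution (params : Int × Int) (out : Int) : Prop := out = solution_alt params
instance (params : Int × Int) (out : Int) : Decidable (Spec_solution params out) := by unfold Spec_solution; infer_instance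

-- ===== CLAIM (what is proved, stated in full; the proofs are below) =====
def Claim_equal_solution : Prop := ∀ (params : Int × Int), Dom_solution params → Pre_solution params → Spec_solution params (solution params)

-- ===== LEMMAS AND PROOFS =====

-- ---- proof-side helpers: the loops of B on Nat, and the common-prefix length ----

def natStrip (a b : Nat) : Nat :=
  if a = b then a else natStrip (a / 10) (b / 10)
termination_by a + b
decreasing_by
  have ha : a ≠ 0 → a / 10 < a := fun h => Nat.div_lt_self (Nat.pos_of_ne_zero h) (by norm_num)
  have hb : b ≠ 0 → b / 10 < b := fun h => Nat.div_lt_self (Nat.pos_of_ne_zero h) (by norm_num)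
  have ha' := Nat.div_le_self a 10
  have hb' := Nat.div_le_self b 10
  rcases Nat.eq_zero_or_pos a with h | h
  · subst h; have := hb (by omega); omega
  · have := ha (by omega); omega

def natCnt8 (a : Nat) : Nat :=
  if a = 0 then 0 else (if a % 10 = 8 then 1 else 0) + natCnt8 (a / 10)
termination_by a
decreasing_by exact Nat.div_lt_self (Nat.pos_of_ne_zero (by assumption)) (by norm_num)

def prefLen : List Char → List Char → Nat
  | a :: as, b :: bs => if a = b then prefLen as bs + 1 else 0
  | _, _ => 0

-- ---- structure of Nat.toDigits 10 ----

theorem pvTdcZero (n : Nat) (ds : List Char) : Nat.toDigitsCore 10 0 n ds = ds := by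
  simp [Nat.toDigitsCore]

theorem pvTdcSucc (f n : Nat) (ds : List Char) :
    Nat.toDigitsCore 10 (f + 1) n ds =
      (if n / 10 = 0 then Nat.digitChar (n % 10) :: ds
       else Nat.toDigitsCore 10 f (n / 10) (Nat.digitChar (n % 10) :: ds)) := by
  simp [Nat.toDigitsCore]

theorem pvTdcAcc : ∀ (f n : Nat) (ds : List Char),
    Nat.toDigitsCore 10 f n ds = Nat.toDigitsCore 10 f n [] ++ ds := by
  intro f
  induction f with
  | zero => intro n ds; simp [pvTdcZero]
  | succ f ih =>
    intro n ds
    rw [pvTdcSucc, pvTdcSucc]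
    by_cases h : n / 10 = 0
    · simp [h]
    · simp only [h, if_false]
      rw [ih (n / 10) (Nat.digitChar (n % 10) :: ds), ih (n / 10) [Nat.digitChar (n % 10)]]
      simp

theorem pvTdcFuel : ∀ (n f f' : Nat) (ds : List Char), n < f → n < f' →
    Nat.toDigitsCore 10 f n ds = Nat.toDigitsCore 10 f' n ds := by
  intro n
  induction n using Nat.strong_induction_on with
  | _ n ih =>
    intro f f' ds hf hf'
    obtain ⟨fa, rfl⟩ : ∃ fa, f = fa + 1 := ⟨f - 1, by omega⟩
    obtain ⟨fb, rfl⟩ : ∃ fb, f' = fb + 1 := ⟨f' - 1, by omega⟩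
    rw [pvTdcSucc, pvTdcSucc]
    by_cases h : n / 10 = 0
    · simp [h]
    · simp only [h, if_false]
      have hn : 0 < n := by
        rcases Nat.eq_zero_or_pos n with h0 | h0
        · subst h0; simp at h
        · exact h0
      have hlt : n / 10 < n := Nat.div_lt_self hn (by norm_num)
      exact ih (n / 10) hlt _ _ _ (by omega) (by omega)

theorem pvTdBase (n : Nat) (h : n < 10) : Nat.toDigits 10 n = [Nat.digitChar n] := by
  unfold Nat.toDigits
  rw [pvTdcSucc]
  simp [Nat.div_eq_of_lt h, Nat.mod_eq_of_lt h]

theorem pvTdStep (n : Nat) (h : 10 ≤ n) :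
    Nat.toDigits 10 n = Nat.toDigits 10 (n / 10) ++ [Nat.digitChar (n % 10)] := by
  unfold Nat.toDigits
  rw [pvTdcSucc]
  have hne : n / 10 ≠ 0 := by
    have : 1 ≤ n / 10 := Nat.one_le_div_iff (by norm_num) |>.mpr h
    omega
  simp only [hne, if_false]
  rw [pvTdcAcc n (n / 10)]
  congr 1
  exact pvTdcFuel (n / 10) n (n / 10 + 1) []
    (Nat.div_lt_self (by omega) (by norm_num)) (by omega)

theorem pvTdLenPos (n : Nat) : 0 < (Nat.toDigits 10 n).length := by
  rcases Nat.lt_or_ge n 10 with h | h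
  · rw [pvTdBase n h]; simp
  · rw [pvTdStep n h]; simp

theorem pvTdLenGe2 (n : Nat) (h : 10 ≤ n) : 2 ≤ (Nat.toDigits 10 n).length := by
  rw [pvTdStep n h]
  have := pvTdLenPos (n / 10)
  simp; omega

-- ---- digitChar facts ----

theorem pvDcVal (d : Nat) (h : d < 10) : (Nat.digitChar d).toNat = 48 + d := by
  interval_cases d <;> rfl

theorem pvDcInj (d e : Nat) (hd : d < 10) (he : e < 10)
    (h : Nat.digitChar d = Nat.digitChar e) : d = e := by
  have := congrArg Char.toNat h
  rw [pvDcVal d hd, pvDcVal e he] at this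
  omega

theorem pvDc8 (d : Nat) (h : d < 10) : (Nat.digitChar d = '8') ↔ d = 8 := by
  constructor
  · intro he; exact pvDcInj d 8 h (by norm_num) (by simpa using he)
  · intro he; subst he; rfl

theorem pvTdInj : ∀ a b : Nat, Nat.toDigits 10 a = Nat.toDigits 10 b → a = b := by
  intro a
  induction a using Nat.strong_induction_on with
  | _ a ih =>
    intro b h
    rcases Nat.lt_or_ge a 10 with ha | ha <;> rcases Nat.lt_or_ge b 10 with hb | hb
    · rw [pvTdBase a ha, pvTdBase b hb] at h
      exact pvDcInj a b ha hb (by simpa using h)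
    · have := congrArg List.length h
      rw [pvTdBase a ha] at this
      have h2 := pvTdLenGe2 b hb
      simp at this; omega
    · have := congrArg List.length h
      rw [pvTdBase b hb] at this
      have h2 := pvTdLenGe2 a ha
      simp at this; omega
    · rw [pvTdStep a ha, pvTdStep b hb] at h
      have hlen : ([Nat.digitChar (a % 10)] : List Char).length = ([Nat.digitChar (b % 10)] : List Char).length := by simp
      obtain ⟨h1, h2⟩ := List.append_inj' h (by simp)
      have hdiv : a / 10 = b / 10 :=
        ih (a / 10) (Nat.div_lt_self (by omega) (by norm_num)) (b / 10) h1
      have hmod : a % 10 = b % 10 :=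
        pvDcInj _ _ (Nat.mod_lt a (by norm_num)) (Nat.mod_lt b (by norm_num)) (by simpa using h2)
      omega

-- ---- prefLen facts ----

theorem pvPrefLenSelf : ∀ x : List Char, prefLen x x = x.length := by
  intro x
  induction x with
  | nil => rfl
  | cons a as ih => simp [prefLen, ih]

theorem pvPrefLenAppendSame : ∀ (x u v : List Char),
    prefLen (x ++ u) (x ++ v) = x.length + prefLen u v := by
  intro x
  induction x with
  | nil => intro u v; simp
  | cons a as ih => intro u v; simp [prefLen, ih]; omega

theorem pvPrefLenNe : ∀ (x y : List Char), x.length = y.length → x ≠ y → ∀ c d,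
    prefLen (x ++ [c]) (y ++ [d]) = prefLen x y ∧ prefLen x y < x.length := by
  intro x
  induction x with
  | nil =>
    intro y hlen hne
    cases y with
    | nil => exact absurd rfl hne
    | cons b bs => simp at hlen
  | cons a as ih =>
    intro y hlen hne c d
    cases y with
    | nil => simp at hlen
    | cons b bs =>
      by_cases hab : a = b
      · subst hab
        have hne' : as ≠ bs := fun h => hne (by rw [h])
        have hlen' : as.length = bs.length := by simpa using hlen
        obtain ⟨h1, h2⟩ := ih bs hlen' hne' c d
        constructor
        · simp [prefLen, h1]
        · simp [prefLen]; omega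
      · constructor
        · simp [prefLen, hab]
        · simp [prefLen, hab]

-- ---- natCnt8 counts '8' in the decimal string ----

theorem pvCnt8Eq : ∀ a : Nat, natCnt8 a = (Nat.toDigits 10 a).count '8' := by
  intro a
  induction a using Nat.strong_induction_on with
  | _ a ih =>
    rcases Nat.lt_or_ge a 10 with ha | ha
    · rcases Nat.eq_zero_or_pos a with h0 | h0
      · subst h0
        rw [pvTdBase 0 (by norm_num), natCnt8]
        decide
      · have hane : a ≠ 0 := by omega
        rw [natCnt8, pvTdBase a ha]
        have hdiv : a / 10 = 0 := Nat.div_eq_of_lt ha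
        have hmod : a % 10 = a := Nat.mod_eq_of_lt ha
        simp only [hane, if_false, hdiv, hmod]
        rw [show natCnt8 0 = 0 from by rw [natCnt8]; simp]
        rw [List.count_cons, List.count_nil]
        by_cases h8 : a = 8
        · subst h8; decide
        · have hb : (Nat.digitChar a == '8') = false := by
            simp only [beq_eq_false_iff_ne, ne_eq]
            intro h; exact h8 ((pvDc8 a ha).mp h)
          simp [h8, hb]
    · rw [natCnt8, pvTdStep a ha]
      have hane : a ≠ 0 := by omega
      simp only [hane, if_false]
      rw [ih (a / 10) (Nat.div_lt_self (by omega) (by norm_num))]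
      rw [List.count_append, List.count_cons, List.count_nil]
      have hm : a % 10 < 10 := Nat.mod_lt a (by norm_num)
      by_cases h8 : a % 10 = 8
      · rw [h8]
        norm_num [Nat.digitChar]
        omega
      · have hb : (Nat.digitChar (a % 10) == '8') = false := by
          simp only [beq_eq_false_iff_ne, ne_eq]
          intro h; exact h8 ((pvDc8 _ hm).mp h)
        simp [h8, hb]

-- ---- the crux: the strip loop computes exactly the common prefix ----

theorem pvStripCount : ∀ a b : Nat,
    (Nat.toDigits 10 a).length = (Nat.toDigits 10 b).length →
    natCnt8 (natStrip a b) =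
      ((Nat.toDigits 10 a).take (prefLen (Nat.toDigits 10 a) (Nat.toDigits 10 b))).count '8' := by
  intro a
  induction a using Nat.strong_induction_on with
  | _ a ih =>
    intro b hlen
    by_cases hab : a = b
    · subst hab
      rw [natStrip, pvPrefLenSelf, List.take_length, pvCnt8Eq]
      simp
    · rw [natStrip]
      simp only [hab, if_false]
      rcases Nat.lt_or_ge a 10 with ha | ha
      · have hb : b < 10 := by
          by_contra hb10
          rw [pvTdBase a ha] at hlen
          have := pvTdLenGe2 b (by omega)
          simp at hlen; omega
        have hdc : Nat.digitChar a ≠ Nat.digitChar b := fun h => hab (pvDcInj a b ha hb h)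
        rw [pvTdBase a ha, pvTdBase b hb]
        have hda : a / 10 = 0 := Nat.div_eq_of_lt ha
        have hdb : b / 10 = 0 := Nat.div_eq_of_lt hb
        rw [hda, hdb, show natStrip 0 0 = 0 from by rw [natStrip]; simp,
            show natCnt8 0 = 0 from by rw [natCnt8]; simp]
        simp [prefLen, hdc]
      · have hb : 10 ≤ b := by
          by_contra hb10
          rw [pvTdBase b (by omega)] at hlen
          have := pvTdLenGe2 a ha
          simp at hlen; omega
        have hstepa := pvTdStep a ha
        have hstepb := pvTdStep b hb
        have hlen' : (Nat.toDigits 10 (a / 10)).length = (Nat.toDigits 10 (b / 10)).length := by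
          rw [hstepa, hstepb] at hlen; simpa using hlen
        have hlta : a / 10 < a := Nat.div_lt_self (by omega) (by norm_num)
        by_cases hx : Nat.toDigits 10 (a / 10) = Nat.toDigits 10 (b / 10)
        · -- same prefix strings, so the last digits differ
          have hdiv : a / 10 = b / 10 := pvTdInj _ _ hx
          have hmod : a % 10 ≠ b % 10 := by
            intro h; exact hab (by omega)
          have hdc : Nat.digitChar (a % 10) ≠ Nat.digitChar (b % 10) := fun h =>
            hmod (pvDcInj _ _ (Nat.mod_lt a (by norm_num)) (Nat.mod_lt b (by norm_num)) h)
          rw [hstepa, hstepb, ← hx]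
          rw [pvPrefLenAppendSame]
          rw [show prefLen [Nat.digitChar (a % 10)] [Nat.digitChar (b % 10)] = 0 from by
                simp [prefLen, hdc]]
          rw [Nat.add_zero, List.take_left]
          rw [show natStrip (a / 10) (b / 10) = a / 10 from by rw [natStrip, hdiv]; simp]
          exact pvCnt8Eq (a / 10)
        · -- prefixes differ: the mismatch is inside them
          obtain ⟨hpl, hplt⟩ := pvPrefLenNe (Nat.toDigits 10 (a / 10)) (Nat.toDigits 10 (b / 10))
            hlen' hx (Nat.digitChar (a % 10)) (Nat.digitChar (b % 10))
          rw [hstepa, hstepb, hpl]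
          rw [List.take_append_of_le_length (by omega)]
          exact ih (a / 10) hlta (b / 10) hlen'

-- ---- B's fuelled Int loops compute the Nat helpers ----

theorem pvStripBEq : ∀ (f a b : Nat), a + b < f →
    pvStripB f (a : Int) (b : Int) = ((natStrip a b : Nat) : Int) := by
  intro f
  induction f with
  | zero => intro a b h; omega
  | succ f ih =>
    intro a b h
    rw [pvStripB, natStrip]
    by_cases hab : a = b
    · subst hab; simp
    · have hab' : (a : Int) ≠ (b : Int) := by exact_mod_cast hab
      have hfa : PySem.Int.floordiv (a : Int) 10 = ((a / 10 : Nat) : Int) := by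
        exact_mod_cast PySem.Int.floordiv_natCast a 10
      have hfb : PySem.Int.floordiv (b : Int) 10 = ((b / 10 : Nat) : Int) := by
        exact_mod_cast PySem.Int.floordiv_natCast b 10
      simp only [hab', if_false, hab, hfa, hfb]
      apply ih
      have ha : a ≠ 0 → a / 10 < a := fun h => Nat.div_lt_self (Nat.pos_of_ne_zero h) (by norm_num)
      have hb : b ≠ 0 → b / 10 < b := fun h => Nat.div_lt_self (Nat.pos_of_ne_zero h) (by norm_num)
      have ha' := Nat.div_le_self a 10
      have hb' := Nat.div_le_self b 10
      rcases Nat.eq_zero_or_pos a with h0 | h0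
      · subst h0; have := hb (by omega); omega
      · have := ha (by omega); omega

theorem pvCount8BEq : ∀ (f a : Nat) (cnt : Int), a < f →
    pvCount8B f (a : Int) cnt = cnt + ((natCnt8 a : Nat) : Int) := by
  intro f
  induction f with
  | zero => intro a cnt h; omega
  | succ f ih =>
    intro a cnt h
    rw [pvCount8B, natCnt8]
    rcases Nat.eq_zero_or_pos a with h0 | h0
    · subst h0; simp
    · have hpos : (0 : Int) < (a : Int) := by exact_mod_cast h0
      have hane : a ≠ 0 := by omega
      have hfa : PySem.Int.floordiv (a : Int) 10 = ((a / 10 : Nat) : Int) := by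
        exact_mod_cast PySem.Int.floordiv_natCast a 10
      have hma : PySem.Int.mod (a : Int) 10 = ((a % 10 : Nat) : Int) := by
        exact_mod_cast PySem.Int.mod_natCast a 10
      simp only [hpos, if_true, hane, if_false, hfa, hma]
      rw [ih (a / 10) _ (by
        have := Nat.div_lt_self h0 (show 1 < 10 by norm_num); omega)]
      by_cases h8 : a % 10 = 8
      · have hi : ((a % 10 : Nat) : Int) = 8 := by exact_mod_cast h8
        rw [if_pos hi, if_pos h8]
        push_cast; ring
      · have hi : ¬ (((a % 10 : Nat) : Int) = 8) := by exact_mod_cast h8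
        rw [if_neg hi, if_neg h8]
        push_cast; ring

-- ---- A-side lemmas (digit lists ↔ characters, the break-loop ↔ prefix count) ----

theorem pvChar_eq_of_code (c d : Char) (h : (c.toNat : Int) - 48 = (d.toNat : Int) - 48) :
    c = d := by
  have h' : c.toNat = d.toNat := by omega
  exact Char.ext (UInt32.toNat_inj.mp h')

theorem pvMapd_length (s : List Char) : (pvMapdA s).length = s.length := by
  simp [pvMapdA]

theorem pvMapd_count8 (s : List Char) : (pvMapdA s).count 8 = s.count '8' := by
  induction s with
  | nil => rfl
  | cons c cs ih =>
    rw [show pvMapdA (c :: cs) = ((c.toNat : Int) - 48) :: pvMapdA cs from rfl]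
    rw [List.count_cons, List.count_cons, ih]
    congr 1
    by_cases hc : c = '8'
    · subst hc; simp
    · have hd : ¬ ((c.toNat : Int) - 48 = 8) := fun h => hc (pvChar_eq_of_code c '8' (by rw [h]; decide))
      simp [hc, hd]

theorem pvLoop_prefix : ∀ (s t : List Char) (cnt : Int),
    pvLoopA (pvMapdA s) (pvMapdA t) cnt = cnt + ((s.take (prefLen s t)).count '8' : Int) := by
  intro s
  induction s with
  | nil => intro t cnt; cases t <;> simp [pvMapdA, pvLoopA, prefLen]
  | cons a as ih =>
    intro t cnt
    cases t with
    | nil => simp [pvMapdA, pvLoopA, prefLen]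
    | cons b bs =>
      rw [show pvMapdA (a :: as) = ((a.toNat : Int) - 48) :: pvMapdA as from rfl]
      rw [show pvMapdA (b :: bs) = ((b.toNat : Int) - 48) :: pvMapdA bs from rfl]
      by_cases hab : a = b
      · subst hab
        by_cases h8 : a = '8'
        · subst h8
          have e : (('8'.toNat : Int) - 48) = 8 := by decide
          rw [e]
          rw [show pvLoopA ((8 : Int) :: pvMapdA as) ((8 : Int) :: pvMapdA bs) cnt
                = pvLoopA (pvMapdA as) (pvMapdA bs) (cnt + 1) from by simp [pvLoopA]]
          rw [show prefLen ('8' :: as) ('8' :: bs) = prefLen as bs + 1 from by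
                simp [prefLen]]
          rw [List.take_succ_cons, List.count_cons, ih]
          simp
          ring
        · have hd8 : ¬ ((a.toNat : Int) - 48 = 8) :=
            fun h => h8 (pvChar_eq_of_code a '8' (by rw [h]; decide))
          rw [show pvLoopA (((a.toNat : Int) - 48) :: pvMapdA as)
                    (((a.toNat : Int) - 48) :: pvMapdA bs) cnt
                = pvLoopA (pvMapdA as) (pvMapdA bs) cnt from by simp [pvLoopA, hd8]]
          rw [show prefLen (a :: as) (a :: bs) = prefLen as bs + 1 from by
                simp [prefLen]]
          rw [List.take_succ_cons, List.count_cons, ih]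
          simp [h8]
      · have hd : ¬ ((a.toNat : Int) - 48 = (b.toNat : Int) - 48) :=
          fun h => hab (pvChar_eq_of_code a b h)
        rw [show pvLoopA (((a.toNat : Int) - 48) :: pvMapdA as)
                  (((b.toNat : Int) - 48) :: pvMapdA bs) cnt = cnt from by simp [pvLoopA, hd]]
        rw [show prefLen (a :: as) (b :: bs) = 0 from by simp [prefLen, hab]]
        simp

theorem pvCount_take_le (s : List Char) (k : Nat) :
    (s.take k).count '8' ≤ s.count '8' :=
  (List.take_sublist k s).count_le '8'

theorem pvTakePrefixEq : ∀ (s t : List Char), s.take (prefLen s t) = t.take (prefLen s t) := by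
  intro s
  induction s with
  | nil => intro t; cases t <;> rfl
  | cons a as ih =>
    intro t
    cases t with
    | nil => rfl
    | cons b bs =>
      by_cases hab : a = b
      · simp [prefLen, hab, ih bs]
      · simp [prefLen, hab]

-- toChars of a nonnegative int is Nat.toDigits 10
theorem pvToCharsNat (a : Nat) : PySem.Int.toChars (a : Int) = Nat.toDigits 10 a := by
  simp [PySem.Int.toChars]

-- ===== VERDICT (by name: the statement is the Claim_ definition above) =====
theorem solution_spec : Claim_equal_solution := by
  intro params _ hpre
  obtain ⟨h1, h2⟩ := hpre
  obtain ⟨nt, hn⟩ : ∃ nt : Nat, params.1 = (nt : Int) := ⟨params.1.toNat, (Int.toNat_of_nonneg h1).symm⟩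
  obtain ⟨mt, hm⟩ : ∃ mt : Nat, params.2 = (mt : Int) := ⟨params.2.toNat, (Int.toNat_of_nonneg h2).symm⟩
  unfold Spec_solution
  simp only [solution, solution_alt, hn, hm, Int.natAbs_natCast]
  rw [PySem.Int.toList_toStr, PySem.Int.toList_toStr, pvToCharsNat, pvToCharsNat]
  set s := Nat.toDigits 10 nt with hs
  set t := Nat.toDigits 10 mt with ht
  simp only [pvMapd_length]
  by_cases hlen : s.length = t.length
  · simp only [hlen, ne_eq, not_true_eq_false, if_false]
    have hstrip : pvStripB (nt + mt + 1) (nt : Int) (mt : Int) = ((natStrip nt mt : Nat) : Int) :=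
      pvStripBEq (nt + mt + 1) nt mt (by omega)
    rw [hstrip, Int.natAbs_natCast,
        pvCount8BEq (natStrip nt mt + 1) (natStrip nt mt) 0 (by omega), zero_add,
        pvStripCount nt mt (by rw [← hs, ← ht]; exact hlen)]
    rw [← hs, ← ht]
    by_cases hz : (pvMapdA s).count 8 = 0 ∨ (pvMapdA t).count 8 = 0
    · rw [if_pos hz]
      have hzero : (s.take (prefLen s t)).count '8' = 0 := by
        rcases hz with hz | hz
        · rw [pvMapd_count8] at hz
          have := pvCount_take_le s (prefLen s t)
          omega
        · rw [pvMapd_count8] at hz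
          have := pvCount_take_le t (prefLen s t)
          rw [pvTakePrefixEq s t]
          omega
      simp [hzero]
    · rw [if_neg hz, pvLoop_prefix]
      ring
  · have hne : s.length ≠ t.length := hlen
    simp [hne]
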